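-- pv_equiv track=rewrite | github.com/LinearPi/pycode | Coding/ic/license/codebook/V4.py | getHorizontalCharPosition
-- ===== SOURCE A (Python) =====
-- def getHorizontalCharPosition(horsum):
--     result = []  # 用来保存找到的结果：位置，区间大小
--     i = 0
--     while  i < len(horsum):
--         if(horsum[i] > 2000):
--             result.append(i)
--          #跳过这整个不为0的区间，开始寻找下一个区间
--         i = i+1
--     return min(result), max(result)
-- ===== SOURCE B (Python) =====
-- def getHorizontalCharPosition(horsum):
--     n = len(horsum)
--     first = None
--     for i in range(n):
--         if horsum[i] > 2000:
--             first = i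
--             break
--     if first is None:
--         raise ValueError("min() arg is an empty sequence")
--     for j in range(n - 1, -1, -1):
--         if horsum[j] > 2000:
--             return first, j
-- ===== Notes on version B (the rewrite author's own statement) =====
-- stated objective: alternative
-- what changed: Instead of collecting all qualifying indices into a list and reducing with min()/max(), B does two early-exit directed scans: forward for the first index with value > 2000 and backward for the last, raising ValueError when none qualifies (as A's min([]) does); Pre_ excludes exactly those raising inputs.
-- outside the precondition, e.g. on getHorizontalCharPosition([]): A raises ValueError, B raises ValueError
import Mathlib
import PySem

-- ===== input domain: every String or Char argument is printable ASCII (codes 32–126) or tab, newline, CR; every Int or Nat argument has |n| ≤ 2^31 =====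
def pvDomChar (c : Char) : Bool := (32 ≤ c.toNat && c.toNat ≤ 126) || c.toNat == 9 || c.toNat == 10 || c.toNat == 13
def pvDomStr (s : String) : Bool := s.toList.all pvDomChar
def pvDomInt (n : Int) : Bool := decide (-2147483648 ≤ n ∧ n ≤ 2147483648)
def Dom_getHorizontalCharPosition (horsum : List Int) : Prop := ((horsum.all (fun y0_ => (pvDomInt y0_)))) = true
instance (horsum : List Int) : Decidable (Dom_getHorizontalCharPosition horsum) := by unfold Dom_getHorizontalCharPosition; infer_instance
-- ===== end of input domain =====

-- B replaces A's collect-all-indices-then-min/max with two early-exit directed scans (forward for the first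
-- index > 2000, backward for the last); same O(n) cost, different traversal. Pre_ excludes inputs where A raises.


-- ===== PORT A =====
-- A's while loop appending qualifying indices to `result`, as structural recursion carrying the index i.
def aCollect : List Int → Nat → List Int
  | [], _ => []
  | x :: xs, i => (if x > 2000 then [(i : Int)] else []) ++ aCollect xs (i + 1)

def getHorizontalCharPosition (horsum : List Int) : Int × Int :=
  let result := aCollect horsum 0
  ((result.min?).getD 0, (result.max?).getD 0)   -- min([])/max([]) raises in Python: excluded by Pre_

-- ===== PORT B =====
-- forward early-exit scan: first index with value > 2000
def bFwd : List Int → Nat → Option Int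
  | [], _ => none
  | x :: xs, i => if x > 2000 then some (i : Int) else bFwd xs (i + 1)

-- backward early-exit scan: walks the reversed list, index counting down from n-1
def bBwd : List Int → Nat → Option Int
  | [], _ => none
  | x :: xs, i => if x > 2000 then some (i : Int) else bBwd xs (i - 1)

def getHorizontalCharPosition_alt (horsum : List Int) : Int × Int :=
  match bFwd horsum 0, bBwd horsum.reverse (horsum.length - 1) with
  | some f, some l => (f, l)
  | _, _ => (0, 0)   -- unreachable under Pre_ (B raises ValueError there, like A)

-- ===== PRECONDITION & SPEC =====
-- Pre_ excludes exactly the inputs with no element > 2000, on which A raises ValueError (min of empty list).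
def Pre_getHorizontalCharPosition (horsum : List Int) : Prop := ∃ x ∈ horsum, 2000 < x
instance (horsum : List Int) : Decidable (Pre_getHorizontalCharPosition horsum) := by unfold Pre_getHorizontalCharPosition; infer_instance
def pvWitness_getHorizontalCharPosition : List Int := [5, 2001, 3]

def Spec_getHorizontalCharPosition (horsum : List Int) (out : Int × Int) : Prop := out = getHorizontalCharPosition_alt horsum
instance (horsum : List Int) (out : Int × Int) : Decidable (Spec_getHorizontalCharPosition horsum out) := by unfold Spec_getHorizontalCharPosition; infer_instance

-- ===== CLAIM (what is proved, stated in full; the proofs are below) =====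
def Claim_equal_getHorizontalCharPosition : Prop := ∀ (horsum : List Int), Dom_getHorizontalCharPosition horsum → Pre_getHorizontalCharPosition horsum → Spec_getHorizontalCharPosition horsum (getHorizontalCharPosition horsum)

-- ===== LEMMAS AND PROOFS =====

theorem aCollect_bounds : ∀ (xs : List Int) (i : Nat), ∀ y ∈ aCollect xs i, (i : Int) ≤ y ∧ y < (i : Int) + xs.length := by
  intro xs
  induction xs with
  | nil => intro i y hy; simp [aCollect] at hy
  | cons x xs ih =>
    intro i y hy
    simp only [aCollect, List.mem_append] at hy
    have hcase : y = (i : Int) ∨ y ∈ aCollect xs (i + 1) := by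
      rcases hy with hy | hy
      · left; split at hy <;> simp at hy; exact hy
      · right; exact hy
    simp only [List.length_cons]
    rcases hcase with rfl | hy
    · refine ⟨le_refl _, ?_⟩; push_cast; omega
    · have := ih (i + 1) y hy
      push_cast at this ⊢
      refine ⟨by omega, by omega⟩

theorem aCollect_append : ∀ (ys zs : List Int) (i : Nat),
    aCollect (ys ++ zs) i = aCollect ys i ++ aCollect zs (i + ys.length) := by
  intro ys
  induction ys with
  | nil => intro zs i; simp [aCollect]
  | cons y ys ih =>
    intro zs i
    simp only [List.cons_append, aCollect, ih, List.length_cons]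
    rw [List.append_assoc]
    have : i + 1 + ys.length = i + (ys.length + 1) := by omega
    rw [this]

theorem min_eq_fwd : ∀ (xs : List Int) (i : Nat), (aCollect xs i).min? = bFwd xs i := by
  intro xs
  induction xs with
  | nil => intro i; simp [aCollect, bFwd]
  | cons x xs ih =>
    intro i
    by_cases h : 2000 < x
    · simp only [aCollect, bFwd, if_pos h]
      rw [List.min?_eq_some_iff]
      refine ⟨by simp, ?_⟩
      intro b hb
      simp only [List.singleton_append, List.mem_cons] at hb
      rcases hb with rfl | hb
      · exact le_refl _
      · have := aCollect_bounds xs (i + 1) b hb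
        push_cast at this; omega
    · simp only [aCollect, bFwd, if_neg h]
      simpa using ih (i + 1)

theorem max_eq_bwd : ∀ (xs : List Int) (i : Nat),
    (aCollect xs i).max? = bBwd xs.reverse (i + xs.length - 1) := by
  intro xs
  induction xs using List.reverseRecOn with
  | nil => intro i; simp [aCollect, bBwd]
  | append_singleton xs x ih =>
    intro i
    rw [aCollect_append]
    simp only [aCollect, List.append_nil, List.reverse_append, List.reverse_cons,
      List.reverse_nil, List.nil_append, List.cons_append, List.length_append,
      List.length_cons, List.length_nil]
    have hidx : i + (xs.length + (0 + 1)) - 1 = i + xs.length := by omega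
    rw [hidx]
    by_cases h : 2000 < x
    · simp only [bBwd, if_pos h]
      rw [List.max?_eq_some_iff]
      constructor
      · simp
      · intro b hb
        simp only [List.mem_append, List.mem_singleton] at hb
        rcases hb with hb | rfl
        · have := aCollect_bounds xs i b hb
          push_cast; push_cast at this; omega
        · exact le_refl _
    · simp only [bBwd, if_neg h, List.append_nil]
      rw [ih i]

theorem aCollect_ne_nil : ∀ (xs : List Int) (i : Nat), (∃ x ∈ xs, 2000 < x) → aCollect xs i ≠ [] := by
  intro xs
  induction xs with
  | nil => intro i h; simp at h
  | cons x xs ih =>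
    intro i h
    by_cases hx : 2000 < x
    · simp [aCollect, hx]
    · simp only [aCollect, if_neg hx, List.nil_append]
      apply ih
      rcases h with ⟨y, hy, h2000⟩
      rcases List.mem_cons.mp hy with rfl | hy
      · exact absurd h2000 hx
      · exact ⟨y, hy, h2000⟩

-- ===== VERDICT (by name: the statement is the Claim_ definition above) =====
theorem getHorizontalCharPosition_spec : Claim_equal_getHorizontalCharPosition := by
  intro horsum _ hpre
  unfold Spec_getHorizontalCharPosition getHorizontalCharPosition getHorizontalCharPosition_alt
  have hne := aCollect_ne_nil horsum 0 hpre
  have h1 := min_eq_fwd horsum 0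
  have h2 := max_eq_bwd horsum 0
  simp only [Nat.zero_add] at h2
  obtain ⟨m, hm⟩ : ∃ m, (aCollect horsum 0).min? = some m := by
    have := mt List.min?_eq_none_iff.mp hne
    exact Option.ne_none_iff_exists'.mp this
  obtain ⟨M, hM⟩ : ∃ M, (aCollect horsum 0).max? = some M := by
    have := mt List.max?_eq_none_iff.mp hne
    exact Option.ne_none_iff_exists'.mp this
  rw [hm] at h1
  rw [hM] at h2
  simp [← h1, ← h2, hm, hM]
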